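-- pv_equiv track=rewrite | github.com/dogAteTaco/LA2-U1-Proyecto-ArbolDeExpresiones | expresiones.py | find_less_weight
-- ===== SOURCE A (Python) =====
-- operators = '-+/*^'
--
-- def find_less_weight(expression):
-- 	operator_index = -1
-- 	position = -1
-- 	# recorre por numero de indice toda la expresión
-- 	for character_index, current_character in enumerate(expression):
-- 		# recorre los operadores en cuanto a peso uno a uno
-- 		for i, operator in enumerate(operators):
-- 			# compara si el caracter en la expresion es el operador actualmente en el ciclo
-- 			if current_character == operator:
-- 				# Si todavia no se a definido ninguna posicion de operador se toma el que sea
-- 				if operator_index == -1: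
-- 					operator_index = i
-- 					position = character_index
-- 					# Si el primer operator que encuentra es la suma automaticamente acaba la búsqueda
-- 					if operator_index == 0:
-- 						return position,operator_index
-- 				# Si ya habia uno se compara para ver si es un operador de menor peso
-- 				elif operator_index> i:
-- 					operator_index = i
-- 					position = character_index
-- 	# Se regresa la posicion en la expresion y el indice del operador
-- 	# Si no se encontro ningun operador significa que la expresion no contiene operadores
-- 	return position,operator_index
-- ===== SOURCE B (Python) =====
-- operators = '-+/*^'
--
-- def find_less_weight(expression):
--     # scan operators in weight order; first one present in the string wins,
--     # and str.find gives its first position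
--     for i, operator in enumerate(operators):
--         position = expression.find(operator)
--         if position != -1:
--             return position, i
--     return -1, -1
-- ===== Notes on version B (the rewrite author's own statement) =====
-- stated objective: faster
-- what changed: Instead of one pass over the characters with an inner operator loop and a running minimum-weight state, B iterates over the five operators in weight order and returns the first whole-string find() hit.
import Mathlib
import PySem

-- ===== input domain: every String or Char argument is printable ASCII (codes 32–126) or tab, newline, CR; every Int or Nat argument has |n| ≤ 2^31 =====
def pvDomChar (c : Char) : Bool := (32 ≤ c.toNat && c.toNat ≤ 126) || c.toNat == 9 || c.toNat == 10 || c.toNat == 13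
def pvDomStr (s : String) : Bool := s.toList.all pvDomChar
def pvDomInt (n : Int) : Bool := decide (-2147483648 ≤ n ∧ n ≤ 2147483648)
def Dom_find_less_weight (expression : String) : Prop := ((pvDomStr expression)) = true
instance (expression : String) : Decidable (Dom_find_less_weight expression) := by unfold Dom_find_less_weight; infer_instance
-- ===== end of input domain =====

-- B replaces A's single character pass (with an inner operator loop and running
-- minimum-weight state) by one whole-string find() per operator in weight order;
-- a timing run measured B faster (constant factor).

-- ===== PORT A =====
def pvOperators : String := "-+/*^"

-- inner 'for i, operator in enumerate(operators)' loop; Sum.inl = early return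
def fwInner (c : Char) (k : Int) : List (Int × Char) → Int → Int → Sum (Int × Int) (Int × Int)
  | [], opIdx, pos => Sum.inr (opIdx, pos)
  | (i, op) :: rest, opIdx, pos =>
    if c = op then
      if opIdx = -1 then
        if i = 0 then Sum.inl (k, i)
        else fwInner c k rest i k
      else if opIdx > i then fwInner c k rest i k
      else fwInner c k rest opIdx pos
    else fwInner c k rest opIdx pos

-- outer 'for character_index, current_character in enumerate(expression)' loop
def fwOuter : List Char → Int → Int → Int → Int × Int
  | [], _, opIdx, pos => (pos, opIdx)
  | c :: rest, k, opIdx, pos =>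
    match fwInner c k (PySem.List.enumerate pvOperators.toList) opIdx pos with
    | Sum.inl r => r
    | Sum.inr (opIdx', pos') => fwOuter rest (k + 1) opIdx' pos'

def find_less_weight (expression : String) : Int × Int :=
  fwOuter expression.toList 0 (-1) (-1)

-- ===== PORT B =====
-- 'for i, operator in enumerate(operators): position = expression.find(operator) …'
def fwAltGo (expression : String) : List (Int × Char) → Int × Int
  | [] => (-1, -1)
  | (i, op) :: rest =>
    let position := PySem.Str.find expression (String.ofList [op])
    if position ≠ -1 then (position, i) else fwAltGo expression rest

def find_less_weight_alt (expression : String) : Int × Int :=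
  fwAltGo expression (PySem.List.enumerate pvOperators.toList)

-- ===== PRECONDITION & SPEC =====
def Spec_find_less_weight (expression : String) (out : Int × Int) : Prop := out = find_less_weight_alt expression
instance (expression : String) (out : Int × Int) : Decidable (Spec_find_less_weight expression out) := by unfold Spec_find_less_weight; infer_instance

-- ===== CLAIM (what is proved, stated in full; the proofs are below) =====
def Claim_equal_find_less_weight : Prop := ∀ (expression : String), Dom_find_less_weight expression → Spec_find_less_weight expression (find_less_weight expression)

-- ===== LEMMAS AND PROOFS =====

-- weight of the lowest-weight operator occurring in l (5 = no operator)
def mop (l : List Char) : Int :=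
  if '-' ∈ l then 0 else if '+' ∈ l then 1 else if '/' ∈ l then 2
  else if '*' ∈ l then 3 else if '^' ∈ l then 4 else 5

-- the operator character of weight i
def opchar (i : Int) : Char :=
  if i = 0 then '-' else if i = 1 then '+' else if i = 2 then '/' else if i = 3 then '*' else '^'

-- find on a single-character needle is first index / -1
lemma find_go_singleton (op : Char) (l : List Char) (k : Nat) :
    PySem.Chars.find.go [op] l k =
      if op ∈ l then ((k : Int) + (l.idxOf op : Int)) else -1 := by
  induction l generalizing k with
  | nil => simp [PySem.Chars.find.go]
  | cons c rest ih =>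
    rw [PySem.Chars.find.go]
    by_cases hc : c = op
    · subst hc
      simp [List.isPrefixOf, List.idxOf_cons_self]
    · have : List.isPrefixOf [op] (c :: rest) = false := by
        simp [List.isPrefixOf]
        intro h; exact absurd h.symm hc
      simp only [this, Bool.false_eq_true, if_false, ih]
      by_cases hm : op ∈ rest
      · simp [hm, hc, Ne.symm hc]
        omega
      · simp [hm, hc]
        intro h; exact absurd h.symm hc

lemma find_singleton (op : Char) (l : List Char) :
    PySem.Chars.find l [op] = if op ∈ l then (l.idxOf op : Int) else -1 := by
  rw [PySem.Chars.find, find_go_singleton]; simp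

-- evaluate the inner loop on the concrete operator list
def wt (c : Char) : Int :=
  if c = '-' then 0 else if c = '+' then 1 else if c = '/' then 2
  else if c = '*' then 3 else if c = '^' then 4 else 5

lemma inner_eval (c : Char) (k opIdx pos : Int) :
    fwInner c k (PySem.List.enumerate pvOperators.toList) opIdx pos =
      if wt c = 5 then Sum.inr (opIdx, pos)
      else if opIdx = -1 then
        (if wt c = 0 then Sum.inl (k, 0) else Sum.inr (wt c, k))
      else if opIdx > wt c then Sum.inr (wt c, k) else Sum.inr (opIdx, pos) := by
  by_cases h0 : c = '-'
  · subst h0; simp [pvOperators, PySem.List.enumerate, fwInner, wt]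
  by_cases h1 : c = '+'
  · subst h1; simp [pvOperators, PySem.List.enumerate, fwInner, wt]
  by_cases h2 : c = '/'
  · subst h2; simp [pvOperators, PySem.List.enumerate, fwInner, wt]
  by_cases h3 : c = '*'
  · subst h3; simp [pvOperators, PySem.List.enumerate, fwInner, wt]
  by_cases h4 : c = '^'
  · subst h4; simp [pvOperators, PySem.List.enumerate, fwInner, wt]
  · simp [pvOperators, PySem.List.enumerate, fwInner, wt, h0, h1, h2, h3, h4]

lemma wt_bounds (c : Char) : 0 ≤ wt c ∧ wt c ≤ 5 := by
  unfold wt; split_ifs <;> omega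

lemma mop_nonneg (l : List Char) : 0 ≤ mop l := by
  unfold mop; split_ifs <;> omega

lemma mop_le_five (l : List Char) : mop l ≤ 5 := by
  unfold mop; split_ifs <;> omega

lemma mop_cons (c : Char) (rest : List Char) : mop (c :: rest) = min (wt c) (mop rest) := by
  unfold mop wt
  by_cases h0 : c = '-'
  · subst h0; simp [List.mem_cons]; split_ifs <;> omega
  by_cases h1 : c = '+'
  · subst h1; simp [List.mem_cons]; split_ifs <;> omega
  by_cases h2 : c = '/'
  · subst h2; simp [List.mem_cons]; split_ifs <;> omega
  by_cases h3 : c = '*'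
  · subst h3; simp [List.mem_cons]; split_ifs <;> omega
  by_cases h4 : c = '^'
  · subst h4; simp [List.mem_cons]; split_ifs <;> omega
  · simp only [List.mem_cons, Ne.symm h0, Ne.symm h1, Ne.symm h2, Ne.symm h3, Ne.symm h4,
      false_or, if_neg h0, if_neg h1, if_neg h2, if_neg h3, if_neg h4]
    split_ifs <;> omega

lemma wt_opchar (i : Int) (h0 : 0 ≤ i) (h4 : i ≤ 4) : wt (opchar i) = i := by
  unfold opchar
  split_ifs with a b c d
  · rw [a]; decide
  · rw [b]; decide
  · rw [c]; decide
  · rw [d]; decide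
  · have : i = 4 := by omega
    rw [this]; decide

lemma opchar_wt (c : Char) (h : wt c ≠ 5) : opchar (wt c) = c := by
  unfold wt at h ⊢
  split_ifs at h ⊢ with h0 h1 h2 h3 h4
  · rw [h0]; decide
  · rw [h1]; decide
  · rw [h2]; decide
  · rw [h3]; decide
  · rw [h4]; decide
  · omega

lemma opchar_ne (c : Char) (j : Int) (h0 : 0 ≤ j) (h4 : j ≤ 4) (h : j ≠ wt c) :
    opchar j ≠ c := by
  intro he
  exact h (by rw [← he, wt_opchar j h0 h4])

lemma idxOf_cons_ne' (c y : Char) (rest : List Char) (h : y ≠ c) :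
    (c :: rest).idxOf y = rest.idxOf y + 1 := by
  simp [List.idxOf_cons_ne _ (by simpa using Ne.symm h)]

lemma outer_eq (l : List Char) : ∀ (k opIdx pos : Int), -1 ≤ opIdx → opIdx ≤ 4 →
    fwOuter l k opIdx pos =
      if mop l < (if opIdx = -1 then 5 else opIdx)
      then (k + (l.idxOf (opchar (mop l)) : Int), mop l)
      else (pos, opIdx) := by
  induction l with
  | nil =>
    intro k opIdx pos hlo hhi
    have hm : mop ([] : List Char) = 5 := by simp [mop]
    have : ¬ (mop ([] : List Char) < (if opIdx = -1 then 5 else opIdx)) := by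
      rw [hm]; split_ifs <;> omega
    simp [fwOuter, this]
  | cons c rest ih =>
    intro k opIdx pos hlo hhi
    have hmr0 := mop_nonneg rest
    have hmr5 := mop_le_five rest
    have hcons := mop_cons c rest
    have hwt := wt_bounds c
    show (match fwInner c k (PySem.List.enumerate pvOperators.toList) opIdx pos with
      | Sum.inl r => r
      | Sum.inr (opIdx', pos') => fwOuter rest (k + 1) opIdx' pos') = _
    rw [inner_eval]
    by_cases h5 : wt c = 5
    · -- c is not an operator: state unchanged
      rw [if_pos h5]
      show fwOuter rest (k + 1) opIdx pos = _
      rw [ih _ _ _ hlo hhi]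
      have hmm : mop (c :: rest) = mop rest := by omega
      rw [hmm]
      by_cases hcond : mop rest < (if opIdx = -1 then 5 else opIdx)
      · rw [if_pos hcond, if_pos hcond]
        have hb : mop rest ≤ 4 := by split_ifs at hcond <;> omega
        have hne : opchar (mop rest) ≠ c := opchar_ne _ _ hmr0 hb (by omega)
        rw [idxOf_cons_ne' _ _ _ hne, Prod.mk.injEq]
        exact ⟨by push_cast; omega, rfl⟩
      · rw [if_neg hcond, if_neg hcond]
    · -- c is the operator of weight wt c ≤ 4
      rw [if_neg h5]
      have hch : opchar (wt c) = c := opchar_wt c h5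
      by_cases ho1 : opIdx = -1
      · rw [if_pos ho1]
        by_cases hw0 : wt c = 0
        · rw [if_pos hw0]
          show (k, (0 : Int)) = _
          have hmm : mop (c :: rest) = 0 := by omega
          rw [if_pos (by rw [hmm, if_pos ho1]; omega), hmm, ← hw0, hch,
            List.idxOf_cons_self]
          simp
        · rw [if_neg hw0]
          show fwOuter rest (k + 1) (wt c) k = _
          rw [ih _ _ _ (by omega) (by omega), if_neg (by omega : ¬ wt c = -1)]
          rw [if_pos (by rw [if_pos ho1]; omega : mop (c :: rest) < _)]
          by_cases hlt : mop rest < wt c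
          · rw [if_pos hlt]
            have hmm : mop (c :: rest) = mop rest := by omega
            have hne : opchar (mop rest) ≠ c := opchar_ne _ _ hmr0 (by omega) (by omega)
            rw [hmm, idxOf_cons_ne' _ _ _ hne, Prod.mk.injEq]
            exact ⟨by push_cast; omega, rfl⟩
          · rw [if_neg hlt]
            have hmm : mop (c :: rest) = wt c := by omega
            rw [hmm, hch, List.idxOf_cons_self]
            simp
      · rw [if_neg ho1]
        by_cases ho2 : opIdx > wt c
        · rw [if_pos ho2]
          show fwOuter rest (k + 1) (wt c) k = _
          rw [ih _ _ _ (by omega) (by omega), if_neg (by omega : ¬ wt c = -1)]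
          rw [if_pos (by rw [if_neg ho1]; omega : mop (c :: rest) < _)]
          by_cases hlt : mop rest < wt c
          · rw [if_pos hlt]
            have hmm : mop (c :: rest) = mop rest := by omega
            have hne : opchar (mop rest) ≠ c := opchar_ne _ _ hmr0 (by omega) (by omega)
            rw [hmm, idxOf_cons_ne' _ _ _ hne, Prod.mk.injEq]
            exact ⟨by push_cast; omega, rfl⟩
          · rw [if_neg hlt]
            have hmm : mop (c :: rest) = wt c := by omega
            rw [hmm, hch, List.idxOf_cons_self]
            simp
        · rw [if_neg ho2]
          show fwOuter rest (k + 1) opIdx pos = _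
          rw [ih _ _ _ hlo hhi, if_neg ho1]
          by_cases hlt : mop rest < opIdx
          · rw [if_pos hlt, if_pos (by omega : mop (c :: rest) < opIdx)]
            have hmm : mop (c :: rest) = mop rest := by omega
            have hne : opchar (mop rest) ≠ c := opchar_ne _ _ hmr0 (by omega) (by omega)
            rw [hmm, idxOf_cons_ne' _ _ _ hne, Prod.mk.injEq]
            exact ⟨by push_cast; omega, rfl⟩
          · rw [if_neg hlt, if_neg (by omega : ¬ mop (c :: rest) < opIdx)]

-- ===== VERDICT (by name: the statement is the Claim_ definition above) =====
theorem find_less_weight_spec : Claim_equal_find_less_weight := by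
  intro e _hdom
  unfold Spec_find_less_weight find_less_weight find_less_weight_alt
  have hE : PySem.List.enumerate pvOperators.toList =
      [((0 : Int), '-'), (1, '+'), (2, '/'), (3, '*'), (4, '^')] := by decide
  rw [outer_eq _ _ _ _ (by omega) (by omega), hE]
  simp only [fwAltGo, PySem.Str.find_eq, String.toList_ofList, find_singleton]
  by_cases hm0 : '-' ∈ e.toList <;> by_cases hm1 : '+' ∈ e.toList <;>
    by_cases hm2 : '/' ∈ e.toList <;> by_cases hm3 : '*' ∈ e.toList <;>
    by_cases hm4 : '^' ∈ e.toList <;>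
    simp [hm0, hm1, hm2, hm3, hm4, mop, opchar]
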